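-- pv_equiv track=rewrite | github.com/jhan756k/Study | 코딩테스트/Jobda.py | Pcal
-- ===== SOURCE A (Python) =====
-- def Pcal(a, b):
--     tm1 = a
--     tm2 = b
--     while True:
--         if (tm1%2==0 and tm1!=0) and (tm2%2==0 and tm2!=0):
--             tm1>>=1
--             tm2>>=2
--         else:
--             if (tm1%2==1 or tm1==0) and not (tm2%2==1 or tm2==0):
--                 return b
--             else:
--                 return a
-- ===== SOURCE B (Python) =====
-- def Pcal(a, b):
--     # closed-form halving count of a: trailing zeros (lowest set bit), 0 for a == 0
--     ka = 0 if a == 0 else (a & -a).bit_length() - 1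
--     # A keeps quartering b while it stays even and nonzero; it outlasts a's ka steps
--     # exactly when the even-position bits 0,2,...,2*ka of b are clear and b >> 2*ka != 0
--     mask = (4 ** (ka + 1) - 1) // 3
--     return b if b & mask == 0 and b >> (2 * ka) != 0 else a
-- ===== Notes on version B (the rewrite author's own statement) =====
-- stated objective: simpler
-- what changed: Replaces A's interleaved shift loop with a fully loop-free closed form: a's halving count from the lowest-set-bit trick ((a & -a).bit_length()-1) and a single bitmask test on b (b & 0b01..0101 mask == 0 and b >> 2*ka != 0) instead of any iteration over b.
import Mathlib
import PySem

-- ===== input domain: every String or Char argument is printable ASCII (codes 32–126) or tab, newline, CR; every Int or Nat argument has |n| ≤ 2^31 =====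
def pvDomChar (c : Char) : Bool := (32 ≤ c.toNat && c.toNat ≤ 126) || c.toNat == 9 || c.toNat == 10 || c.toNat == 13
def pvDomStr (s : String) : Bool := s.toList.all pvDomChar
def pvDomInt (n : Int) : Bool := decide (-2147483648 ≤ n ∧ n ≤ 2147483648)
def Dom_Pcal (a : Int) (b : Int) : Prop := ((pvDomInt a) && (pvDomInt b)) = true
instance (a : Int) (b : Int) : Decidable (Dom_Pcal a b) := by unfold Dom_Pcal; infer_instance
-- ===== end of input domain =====

-- B replaces A's interleaved shift loop by a loop-free closed form: a's halving count from
-- the lowest-set-bit trick and one bitmask test on b; objective: simpler (no loops at all).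

-- ===== PORT A =====
-- the 'while True' loop of A; terminates because |tm1| strictly shrinks while the loop iterates
theorem pvShiftRightK_natAbs_lt (t : Int) (k : Nat) (hk : 0 < k) (h : PySem.Int.mod t 2 = 0 ∧ t ≠ 0) :
    (t >>> k).natAbs < t.natAbs := by
  obtain ⟨he, hne⟩ := h
  have h2 : (2 : Int) ∣ t := (PySem.Int.mod_eq_zero_iff_dvd t 2).mp he
  have hp : 2 ≤ 2 ^ k := by
    calc 2 = 2 ^ 1 := rfl
    _ ≤ 2 ^ k := Nat.pow_le_pow_right (by omega) hk
  cases t with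
  | ofNat n =>
      rw [show (Int.ofNat n) >>> k = Int.ofNat (n >>> k) from rfl]
      have hn : n ≠ 0 := by simpa using hne
      have hs : n >>> k = n / 2 ^ k := Nat.shiftRight_eq_div_pow n k
      have hlt : n / 2 ^ k < n := Nat.div_lt_self (by omega) (by omega)
      simp only [Int.ofNat_eq_natCast, Int.natAbs_natCast]
      omega
  | negSucc n =>
      rw [show (Int.negSucc n) >>> k = Int.negSucc (n >>> k) from rfl]
      simp only [Int.natAbs_negSucc]
      have hodd : n % 2 = 1 := by
        rcases h2 with ⟨m, hm⟩
        omega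
      have hs : n >>> k = n / 2 ^ k := Nat.shiftRight_eq_div_pow n k
      have hlt : n / 2 ^ k < n := Nat.div_lt_self (by omega) (by omega)
      omega

def pcalLoop (tm1 tm2 a b : Int) : Int :=
  if h : (PySem.Int.mod tm1 2 = 0 ∧ tm1 ≠ 0) ∧ (PySem.Int.mod tm2 2 = 0 ∧ tm2 ≠ 0) then
    pcalLoop (tm1 >>> (1 : Nat)) (tm2 >>> (2 : Nat)) a b
  else
    if (PySem.Int.mod tm1 2 = 1 ∨ tm1 = 0) ∧ ¬ (PySem.Int.mod tm2 2 = 1 ∨ tm2 = 0) then b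
    else a
termination_by tm1.natAbs
decreasing_by exact pvShiftRightK_natAbs_lt tm1 1 (by omega) h.1

def Pcal (a : Int) (b : Int) : Int := pcalLoop a b a b

-- ===== PORT B =====
-- loop-free: ka = (a & -a).bit_length() - 1; mask = (4 ** (ka + 1) - 1) // 3;
-- return b if b & mask == 0 and b >> (2 * ka) != 0 else a.
-- ka is never negative, so '.toNat' on the exponent and the shift amount is exact.
def Pcal_alt (a : Int) (b : Int) : Int :=
  let ka : Int := if a = 0 then 0 else (PySem.Int.bitLength (PySem.Int.band a (-a)) : Int) - 1
  let mask : Int := PySem.Int.floordiv ((4 : Int) ^ (ka + 1).toNat - 1) 3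
  if PySem.Int.band b mask = 0 ∧ b >>> (2 * ka).toNat ≠ 0 then b else a

-- ===== PRECONDITION & SPEC =====
def Spec_Pcal (a : Int) (b : Int) (out : Int) : Prop := out = Pcal_alt a b
instance (a : Int) (b : Int) (out : Int) : Decidable (Spec_Pcal a b out) := by unfold Spec_Pcal; infer_instance

-- ===== CLAIM (what is proved, stated in full; the proofs are below) =====
def Claim_equal_Pcal : Prop := ∀ (a : Int) (b : Int), Dom_Pcal a b → Spec_Pcal a b (Pcal a b)

-- ===== LEMMAS AND PROOFS =====

-- proof-side counters: a's halving count and b's quartering count (on Int, and on Nat)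
def pvTzI (t : Int) : Nat :=
  if h : PySem.Int.mod t 2 = 0 ∧ t ≠ 0 then pvTzI (t >>> (1 : Nat)) + 1 else 0
termination_by t.natAbs
decreasing_by exact pvShiftRightK_natAbs_lt t 1 (by omega) h

def pvTzN (n : Nat) : Nat :=
  if n % 2 = 0 ∧ n ≠ 0 then pvTzN (n / 2) + 1 else 0
termination_by n
decreasing_by omega

def pvKbN (t : Int) : Nat :=
  if h : PySem.Int.mod t 2 = 0 ∧ t ≠ 0 then pvKbN (t >>> (2 : Nat)) + 1 else 0
termination_by t.natAbs
decreasing_by exact pvShiftRightK_natAbs_lt t 2 (by omega) h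

-- the mask (4^(n+1)-1)/3 = 0b010101…01 with bits 0,2,…,2n set
def pvMaskN : Nat → Nat
  | 0 => 1
  | n + 1 => 4 * pvMaskN n + 1

theorem pvMod2_iff (a : Int) : PySem.Int.mod a 2 = 0 ↔ a.natAbs % 2 = 0 := by
  rw [PySem.Int.mod_eq_emod_of_pos (by norm_num)]
  omega

theorem pvShift1_natAbs (a : Int) (h : PySem.Int.mod a 2 = 0) :
    (a >>> (1 : Nat)).natAbs = a.natAbs / 2 := by
  have h' : a.natAbs % 2 = 0 := (pvMod2_iff a).mp h
  cases a with
  | ofNat n =>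
      rw [show (Int.ofNat n) >>> (1 : Nat) = Int.ofNat (n >>> 1) from rfl]
      have hs : n >>> 1 = n / 2 := by simpa using Nat.shiftRight_eq_div_pow n 1
      simp only [Int.ofNat_eq_natCast, Int.natAbs_natCast] at *
      omega
  | negSucc n =>
      rw [show (Int.negSucc n) >>> (1 : Nat) = Int.negSucc (n >>> 1) from rfl]
      simp only [Int.natAbs_negSucc] at *
      have hs : n >>> 1 = n / 2 := by simpa using Nat.shiftRight_eq_div_pow n 1
      omega

theorem pvTzI_eq (a : Int) : pvTzI a = pvTzN a.natAbs := by
  induction a using pvTzI.induct with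
  | case1 t h ih =>
      rw [pvTzI, dif_pos h, ih, pvShift1_natAbs t h.1]
      have hc : t.natAbs % 2 = 0 ∧ t.natAbs ≠ 0 := by
        refine ⟨(pvMod2_iff t).mp h.1, ?_⟩
        have := h.2
        omega
      have e : pvTzN t.natAbs = pvTzN (t.natAbs / 2) + 1 := by
        rw [pvTzN, if_pos hc]
      exact e.symm
  | case2 t h =>
      rw [pvTzI, dif_neg h]
      have hc : ¬ (t.natAbs % 2 = 0 ∧ t.natAbs ≠ 0) := by
        intro hx
        exact h ⟨(pvMod2_iff t).mpr hx.1, by omega⟩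
      rw [pvTzN, if_neg hc]

-- A's interleaved loop equals the comparison of the two counts
theorem pcalLoop_eq (tm1 tm2 a b : Int) :
    pcalLoop tm1 tm2 a b = if pvTzI tm1 < pvKbN tm2 then b else a := by
  induction tm1, tm2 using pcalLoop.induct with
  | case1 tm1 tm2 h ih =>
      rw [pcalLoop, dif_pos h, ih]
      have e1 : pvTzI tm1 = pvTzI (tm1 >>> (1 : Nat)) + 1 := by rw [pvTzI, dif_pos h.1]
      have e2 : pvKbN tm2 = pvKbN (tm2 >>> (2 : Nat)) + 1 := by rw [pvKbN, dif_pos h.2]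
      have hiff : (pvTzI (tm1 >>> (1 : Nat)) < pvKbN (tm2 >>> (2 : Nat))) ↔
          (pvTzI tm1 < pvKbN tm2) := by
        rw [e1, e2]
        omega
      by_cases hc : pvTzI tm1 < pvKbN tm2
      · rw [if_pos (hiff.mpr hc), if_pos hc]
      · rw [if_neg (fun hx => hc (hiff.mp hx)), if_neg hc]
  | case2 tm1 tm2 h h2 =>
      rw [pcalLoop, dif_neg h, if_pos h2]
      have c2 : PySem.Int.mod tm2 2 = 0 ∧ tm2 ≠ 0 := by
        rcases PySem.Int.mod_two_eq tm2 with h0 | h1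
        · refine ⟨h0, fun hz => h2.2 (Or.inr hz)⟩
        · exact absurd (Or.inl h1) h2.2
      have c1 : ¬ (PySem.Int.mod tm1 2 = 0 ∧ tm1 ≠ 0) := by
        rcases h2.1 with h1 | h0
        · intro hc; omega
        · intro hc; exact hc.2 h0
      have e1 : pvTzI tm1 = 0 := by rw [pvTzI, dif_neg c1]
      have e2 : pvKbN tm2 = pvKbN (tm2 >>> (2 : Nat)) + 1 := by rw [pvKbN, dif_pos c2]
      rw [if_pos (by omega)]
  | case3 tm1 tm2 h h2 =>
      rw [pcalLoop, dif_neg h, if_neg h2]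
      by_cases c2 : PySem.Int.mod tm2 2 = 0 ∧ tm2 ≠ 0
      · have hC2 : ¬ (PySem.Int.mod tm2 2 = 1 ∨ tm2 = 0) := by
          rintro (hx | hx)
          · have := c2.1; omega
          · exact c2.2 hx
        have c1 : PySem.Int.mod tm1 2 = 0 ∧ tm1 ≠ 0 := by
          rcases PySem.Int.mod_two_eq tm1 with h0 | h1
          · refine ⟨h0, fun hz => h2 ⟨Or.inr hz, hC2⟩⟩
          · exact absurd ⟨Or.inl h1, hC2⟩ h2
        exact absurd ⟨c1, c2⟩ h
      · have e2 : pvKbN tm2 = 0 := by rw [pvKbN, dif_neg c2]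
        rw [if_neg (by omega)]

-- Nat lowest-set-bit facts
theorem pvLandOdd (n : Nat) (h : n % 2 = 1) : n &&& (n - 1) = n - 1 := by
  apply Nat.eq_of_testBit_eq
  intro i
  cases i with
  | zero =>
      simp only [Nat.testBit_zero]
      have h0 : (n - 1) % 2 = 0 := by omega
      simp [h0]
  | succ i =>
      rw [Nat.testBit_land]
      simp only [Nat.testBit_succ]
      have e : n / 2 = (n - 1) / 2 := by omega
      rw [e, Bool.and_self]

theorem pvLandEven (n : Nat) (h : n % 2 = 0) :
    n &&& (n - 1) = 2 * ((n / 2) &&& (n / 2 - 1)) := by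
  rcases Nat.eq_zero_or_pos n with h0 | hpos
  · subst h0; simp
  apply Nat.eq_of_testBit_eq
  intro i
  cases i with
  | zero =>
      simp only [Nat.testBit_zero]
      have h2 : (2 * ((n / 2) &&& (n / 2 - 1))) % 2 = 0 := by omega
      simp [h, h2]
  | succ i =>
      rw [Nat.testBit_land]
      simp only [Nat.testBit_succ]
      have e1 : (n - 1) / 2 = n / 2 - 1 := by omega
      have e2 : (2 * ((n / 2) &&& (n / 2 - 1))) / 2 = (n / 2) &&& (n / 2 - 1) := by omega
      rw [e1, e2, Nat.testBit_land]

theorem pvLsb_eq (n : Nat) (h : n ≠ 0) : n - (n &&& (n - 1)) = 2 ^ pvTzN n := by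
  induction n using Nat.strong_induction_on with
  | _ n ih =>
    by_cases hp : n % 2 = 0
    · have hn2 : n / 2 ≠ 0 := by omega
      have hrec := ih (n / 2) (by omega) hn2
      rw [pvLandEven n hp, pvTzN, if_pos ⟨hp, h⟩, pow_succ]
      have hle : (n / 2) &&& (n / 2 - 1) ≤ n / 2 := Nat.and_le_left
      omega
    · have hodd : n % 2 = 1 := by omega
      rw [pvLandOdd n hodd, pvTzN, if_neg (fun hc => hp hc.1), pow_zero]
      omega

theorem pvBand_self_neg (a : Int) (h : a ≠ 0) :
    PySem.Int.band a (-a) = ((a.natAbs - (a.natAbs &&& (a.natAbs - 1)) : Nat) : Int) := by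
  have hn : a.natAbs ≠ 0 := by omega
  rcases Int.natAbs_eq a with he | he <;> rw [he]
  · rw [PySem.Int.band, if_pos (by omega), if_neg (by omega)]
    simp only [neg_neg, Int.toNat_natCast]
    have e : (((a.natAbs : Int)) - 1).toNat = a.natAbs - 1 := by omega
    rw [e]
    simp [Int.natAbs_abs]
  · rw [neg_neg, PySem.Int.band, if_neg (by omega), if_pos (by omega)]
    simp only [neg_neg, Int.toNat_natCast]
    have e : (((a.natAbs : Int)) - 1).toNat = a.natAbs - 1 := by omega
    rw [e]
    simp [Int.natAbs_abs]

theorem pvBitLength_pow (k : Nat) : PySem.Int.bitLength ((2 ^ k : Nat) : Int) = k + 1 := by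
  induction k with
  | zero =>
      rw [PySem.Int.bitLength_natCast (by norm_num)]
      norm_num [PySem.Int.bitLength_zero]
  | succ k ih =>
      rw [PySem.Int.bitLength_natCast (by positivity)]
      have e : 2 ^ (k + 1) / 2 = 2 ^ k := by
        rw [pow_succ]
        exact Nat.mul_div_cancel _ (by norm_num)
      rw [e, ih]

-- B's closed-form ka equals the halving count of a
theorem pvKa_eq (a : Int) :
    (if a = 0 then (0 : Int)
     else (PySem.Int.bitLength (PySem.Int.band a (-a)) : Int) - 1) = (pvTzI a : Int) := by
  by_cases h : a = 0
  · subst h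
    rw [if_pos rfl, pvTzI, dif_neg (fun hc => hc.2 rfl)]
    simp
  · rw [if_neg h, pvBand_self_neg a h, pvLsb_eq a.natAbs (by omega), pvBitLength_pow, pvTzI_eq]
    push_cast
    omega

-- the mask literal of the port equals pvMaskN
theorem pvMaskN_three (n : Nat) : 4 ^ (n + 1) - 1 = 3 * pvMaskN n := by
  induction n with
  | zero => rfl
  | succ n ih =>
      have h1 : (1 : Nat) ≤ 4 ^ (n + 1) := Nat.one_le_pow _ _ (by omega)
      have e : 4 ^ (n + 2) = 4 * 4 ^ (n + 1) := by ring
      rw [pvMaskN]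
      omega

theorem pvMask_eq (n : Nat) :
    PySem.Int.floordiv ((4 : Int) ^ (n + 1) - 1) 3 = (pvMaskN n : Int) := by
  have h1 : (1 : Nat) ≤ 4 ^ (n + 1) := Nat.one_le_pow _ _ (by omega)
  have e : (4 : Int) ^ (n + 1) - 1 = ((4 ^ (n + 1) - 1 : Nat) : Int) := by
    push_cast [h1]
    ring
  rw [e, pvMaskN_three, show (3 : Int) = ((3 : Nat) : Int) from rfl,
    PySem.Int.floordiv_natCast (3 * pvMaskN n) 3, Nat.mul_div_cancel_left _ (by omega : 0 < 3)]

theorem pvMaskN_odd (n : Nat) : pvMaskN n % 2 = 1 := by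
  cases n with
  | zero => rfl
  | succ n => rw [pvMaskN]; omega

-- Nat-level mask facts via testBit
theorem pvNatLandOddNe (k m : Nat) (hk : k % 2 = 1) (hm : m % 2 = 1) : k &&& m ≠ 0 := by
  intro h
  have := congrArg (fun x => x.testBit 0) h
  simp only [Nat.testBit_land, Nat.zero_testBit] at this
  simp [Nat.testBit_zero, hk, hm] at this

theorem pvNatLandEvenIff (k m : Nat) (hk : k % 2 = 0) :
    (k &&& (4 * m + 1) = 0 ↔ (k / 4) &&& m = 0) := by
  have hb1 : (4 * m + 1).testBit 1 = false := by
    rw [show (1 : Nat) = 0 + 1 from rfl, Nat.testBit_succ]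
    simp [Nat.testBit_zero]
    omega
  have hbs : ∀ i, (4 * m + 1).testBit (i + 2) = m.testBit i := by
    intro i
    rw [show i + 2 = (i + 1) + 1 from rfl, Nat.testBit_succ, Nat.testBit_succ]
    have e1 : (4 * m + 1) / 2 = 2 * m := by omega
    have e2 : (2 * m) / 2 = m := by omega
    rw [e1, e2]
  have hks : ∀ i, (k / 4).testBit i = k.testBit (i + 2) := by
    intro i
    rw [show i + 2 = (i + 1) + 1 from rfl, Nat.testBit_succ, Nat.testBit_succ]
    have e : k / 2 / 2 = k / 4 := by omega
    rw [e]
  constructor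
  · intro h
    apply Nat.eq_of_testBit_eq
    intro i
    simp only [Nat.testBit_land, Nat.zero_testBit]
    have hh := congrArg (fun x => x.testBit (i + 2)) h
    simp only [Nat.testBit_land, Nat.zero_testBit] at hh
    rw [hks i, ← hbs i]
    exact hh
  · intro h
    apply Nat.eq_of_testBit_eq
    intro i
    simp only [Nat.testBit_land, Nat.zero_testBit]
    match i with
    | 0 =>
        have h0 : k.testBit 0 = false := by simp [Nat.testBit_zero]; omega
        simp [h0]
    | 1 => simp [hb1]
    | (i + 2) =>
        have hh := congrArg (fun x => x.testBit i) h
        simp only [Nat.testBit_land, Nat.zero_testBit] at hh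
        rw [← hks i, hbs i]
        exact hh

theorem pvNatLandAllOddIff (c m : Nat) (hc : c % 2 = 1) :
    ((4 * m + 1) &&& c = 4 * m + 1 ↔ m &&& (c / 4) = m) := by
  have hbs : ∀ i, (4 * m + 1).testBit (i + 2) = m.testBit i := by
    intro i
    rw [show i + 2 = (i + 1) + 1 from rfl, Nat.testBit_succ, Nat.testBit_succ]
    have e1 : (4 * m + 1) / 2 = 2 * m := by omega
    have e2 : (2 * m) / 2 = m := by omega
    rw [e1, e2]
  have hb1 : (4 * m + 1).testBit 1 = false := by
    rw [show (1 : Nat) = 0 + 1 from rfl, Nat.testBit_succ]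
    simp [Nat.testBit_zero]
    omega
  have hcs : ∀ i, (c / 4).testBit i = c.testBit (i + 2) := by
    intro i
    rw [show i + 2 = (i + 1) + 1 from rfl, Nat.testBit_succ, Nat.testBit_succ]
    have e : c / 2 / 2 = c / 4 := by omega
    rw [e]
  constructor
  · intro h
    apply Nat.eq_of_testBit_eq
    intro i
    simp only [Nat.testBit_land]
    have hh := congrArg (fun x => x.testBit (i + 2)) h
    simp only [Nat.testBit_land] at hh
    rw [hbs i] at hh
    rw [hcs i]
    exact hh
  · intro h
    apply Nat.eq_of_testBit_eq
    intro i
    simp only [Nat.testBit_land]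
    match i with
    | 0 =>
        have h0 : c.testBit 0 = true := by simp [Nat.testBit_zero]; omega
        simp [h0]
    | 1 => simp [hb1]
    | (i + 2) =>
        have hh := congrArg (fun x => x.testBit i) h
        simp only [Nat.testBit_land] at hh
        rw [hcs i] at hh
        rw [hbs i]
        exact hh

theorem pvNatLandOddNeSelf (c m : Nat) (hc : c % 2 = 0) (hm : m % 2 = 1) :
    m &&& c ≠ m := by
  intro h
  have := congrArg (fun x => x.testBit 0) h
  simp only [Nat.testBit_land] at this
  simp [Nat.testBit_zero, hc, hm] at this

-- the Int-level step facts for band b mask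
theorem pvBandOddNe (b : Int) (m : Nat) (hb : PySem.Int.mod b 2 = 1) (hm : m % 2 = 1) :
    PySem.Int.band b (m : Int) ≠ 0 := by
  have hb' : b.natAbs % 2 = 1 := by
    have := pvMod2_iff b
    rcases PySem.Int.mod_two_eq b with h0 | h1
    · omega
    · omega
  cases b with
  | ofNat k =>
      rw [show (Int.ofNat k) = ((k : Nat) : Int) from rfl, PySem.Int.band,
        if_pos (by positivity), if_pos (by positivity)]
      simp only [Int.toNat_natCast]
      have hk : k % 2 = 1 := by simpa using hb'
      exact_mod_cast fun hz => pvNatLandOddNe k m hk hm (by exact_mod_cast hz)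
  | negSucc c =>
      rw [PySem.Int.band, if_neg (by omega), if_pos (by positivity)]
      have e : (-(Int.negSucc c) - 1).toNat = c := by
        rw [Int.negSucc_eq]
        omega
      rw [e]
      simp only [Int.toNat_natCast]
      have hc : c % 2 = 0 := by
        simp only [Int.natAbs_negSucc] at hb'
        omega
      intro hz
      have hz' : m - (m &&& c) = 0 := by exact_mod_cast hz
      have hle : m &&& c ≤ m := Nat.and_le_left
      exact pvNatLandOddNeSelf c m hc hm (by omega)

theorem pvBandEvenStep (b : Int) (m : Nat) (hb : PySem.Int.mod b 2 = 0) :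
    (PySem.Int.band b ((4 * m + 1 : Nat) : Int) = 0 ↔
     PySem.Int.band (b >>> (2 : Nat)) (m : Int) = 0) := by
  have hb' : b.natAbs % 2 = 0 := (pvMod2_iff b).mp hb
  cases b with
  | ofNat k =>
      rw [show (Int.ofNat k) >>> (2 : Nat) = Int.ofNat (k >>> 2) from rfl]
      rw [show (Int.ofNat k) = ((k : Nat) : Int) from rfl,
        show (Int.ofNat (k >>> 2)) = ((k >>> 2 : Nat) : Int) from rfl]
      rw [PySem.Int.band, if_pos (by positivity), if_pos (by positivity),
        PySem.Int.band, if_pos (by positivity), if_pos (by positivity)]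
      simp only [Int.toNat_natCast]
      have hk : k % 2 = 0 := by simpa using hb'
      have hs : k >>> 2 = k / 4 := by
        have := Nat.shiftRight_eq_div_pow k 2
        simpa using this
      rw [hs]
      constructor
      · intro h
        exact_mod_cast (pvNatLandEvenIff k m hk).mp (by exact_mod_cast h)
      · intro h
        exact_mod_cast (pvNatLandEvenIff k m hk).mpr (by exact_mod_cast h)
  | negSucc c =>
      rw [show (Int.negSucc c) >>> (2 : Nat) = Int.negSucc (c >>> 2) from rfl]
      rw [PySem.Int.band, if_neg (by omega), if_pos (by positivity),
        PySem.Int.band, if_neg (by omega), if_pos (by positivity)]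
      have e1 : (-(Int.negSucc c) - 1).toNat = c := by
        rw [Int.negSucc_eq]
        omega
      have e2 : (-(Int.negSucc (c >>> 2)) - 1).toNat = c >>> 2 := by
        rw [Int.negSucc_eq]
        omega
      rw [e1, e2]
      simp only [Int.toNat_natCast]
      have hc : c % 2 = 1 := by
        simp only [Int.natAbs_negSucc] at hb'
        omega
      have hs : c >>> 2 = c / 4 := by
        have := Nat.shiftRight_eq_div_pow c 2
        simpa using this
      rw [hs]
      have hle1 : ((4 * m + 1) &&& c) ≤ 4 * m + 1 := Nat.and_le_left
      have hle2 : (m &&& (c / 4)) ≤ m := Nat.and_le_left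
      constructor
      · intro h
        have h0 : (4 * m + 1 : Nat) - ((4 * m + 1) &&& c) = 0 := by exact_mod_cast h
        have h' : (4 * m + 1) &&& c = 4 * m + 1 := by omega
        have h2 := (pvNatLandAllOddIff c m hc).mp h'
        have h3 : m - (m &&& (c / 4)) = 0 := by omega
        exact_mod_cast h3
      · intro h
        have h0 : (m : Nat) - (m &&& (c / 4)) = 0 := by exact_mod_cast h
        have h' : m &&& (c / 4) = m := by omega
        have h2 := (pvNatLandAllOddIff c m hc).mpr h'
        have h3 : (4 * m + 1 : Nat) - ((4 * m + 1) &&& c) = 0 := by omega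
        exact_mod_cast h3

theorem pvShiftZeroIff (b : Int) (k : Nat) (hb : b = 0) : b >>> k = 0 := by
  subst hb
  simp

-- the core characterisation: B's mask test says exactly 'b survives more than n quarterings'
theorem pvBandIff (b : Int) :
    ∀ n : Nat, (PySem.Int.band b ((pvMaskN n : Nat) : Int) = 0 ∧ b >>> (2 * n) ≠ 0) ↔
      n < pvKbN b := by
  induction b using pvKbN.induct with
  | case1 b h ih =>
      intro n
      rw [pvKbN, dif_pos h]
      cases n with
      | zero =>
          simp only [Nat.mul_zero]
          constructor
          · intro _; omega
          · intro _
            refine ⟨?_, by simpa using h.2⟩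
            rw [show ((pvMaskN 0 : Nat) : Int) = 1 from rfl, PySem.Int.band_one, h.1]
      | succ n =>
          have hsh : b >>> (2 * (n + 1)) = (b >>> (2 : Nat)) >>> (2 * n) := by
            rw [show 2 * (n + 1) = 2 + 2 * n by omega, Int.shiftRight_add]
          have hmk : ((pvMaskN (n + 1) : Nat) : Int) = ((4 * pvMaskN n + 1 : Nat) : Int) := by
            rw [pvMaskN]
          rw [hsh, hmk]
          rw [show (PySem.Int.band b ((4 * pvMaskN n + 1 : Nat) : Int) = 0 ↔
            PySem.Int.band (b >>> (2 : Nat)) ((pvMaskN n : Nat) : Int) = 0) from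
            pvBandEvenStep b (pvMaskN n) h.1]
          rw [ih n]
          omega
  | case2 b h =>
      intro n
      rw [pvKbN, dif_neg h]
      constructor
      · rintro ⟨h1, h2⟩
        exfalso
        by_cases hz : b = 0
        · exact h2 (pvShiftZeroIff b _ hz)
        · have hodd : PySem.Int.mod b 2 = 1 := by
            rcases PySem.Int.mod_two_eq b with h0 | h1'
            · exact absurd ⟨h0, hz⟩ h
            · exact h1'
          exact pvBandOddNe b (pvMaskN n) hodd (pvMaskN_odd n) h1
      · intro hlt
        omega

-- ===== VERDICT (by name: the statement is the Claim_ definition above) =====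
theorem Pcal_spec : Claim_equal_Pcal := by
  intro a b _
  show Pcal a b = Pcal_alt a b
  rw [Pcal, pcalLoop_eq]
  simp only [Pcal_alt]
  rw [pvKa_eq]
  have hka1 : ((pvTzI a : Int) + 1).toNat = pvTzI a + 1 := by omega
  have hka2 : ((2 : Int) * (pvTzI a : Int)).toNat = 2 * pvTzI a := by
    omega
  rw [hka1, hka2, pvMask_eq (pvTzI a)]
  by_cases hc : pvTzI a < pvKbN b
  · rw [if_pos hc, if_pos ((pvBandIff b (pvTzI a)).mpr hc)]
  · rw [if_neg hc, if_neg (fun hx => hc ((pvBandIff b (pvTzI a)).mp hx))]
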